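-- pv_equiv track=rewrite | github.com/paullu-ualberta/Rabin.Fingerprint | Alpha/rabin_fingerprint.py | compute_outgoing_table3
-- ===== SOURCE A (Python) =====
-- def compute_outgoing_table3(irreducible, window_size):
--     table = [0] * (2**8)
--     for byte in range(2**8):
--         r = byte
--         for i in range(window_size):
--             r = divide_polynomial(r << 8, irreducible)
--         table[byte] = r
--     return table
--
-- def divide_polynomial(p1, p2): #return p1 - p2. Assuming p1 >= p2
--     mask = 1
--     org_p2 = p2
--     while mask <= p2: #Align the mask to be one bit higher than the leading coefficient of p2
--         mask = mask << 1
--     while mask <= p1: #Push the mask and p2 left untill the mask is one bit higher than p1, making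
--                       #the leading coefficients of p1 and p2 line up
--         mask = mask << 1
--         p2 = p2 << 1
--     mask = mask >> 1 #The mask is now inline with the leading coefficient of p1
--     while p2 >= org_p2:
--         if mask & p1 > 0: #If there is a coefficient in the place being currently looked at
--             p1 = p1 ^ p2 #Subtract p2 from p1
--         mask = mask >> 1 #Move the mask and p2 over
--         p2 = p2 >> 1
--     return p1 #Return the remainder
-- ===== SOURCE B (Python) =====
-- def _polymod(p, m):
--     # remainder of the GF(2) polynomial p modulo m (m >= 1), by top-bit reduction
--     dm = m.bit_length()
--     while p.bit_length() >= dm: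
--         p ^= m << (p.bit_length() - dm)
--     return p
--
-- def compute_outgoing_table3(irreducible, window_size):
--     # The map byte -> byte * x^(8*window_size) mod irreducible is GF(2)-linear,
--     # so reduce only the 8 basis bytes 1<<i and assemble all 256 entries by XOR.
--     basis = []
--     for i in range(8):
--         r = 1 << i
--         for _ in range(window_size):
--             r = _polymod(r << 8, irreducible)
--         basis.append(r)
--     table = []
--     for byte in range(256):
--         v = 0
--         for i in range(8):
--             if (byte >> i) & 1:
--                 v ^= basis[i]
--         table.append(v)
--     return table
-- ===== Notes on version B (the rewrite author's own statement) =====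
-- stated objective: faster
-- what changed: B exploits GF(2)-linearity of the byte map: it reduces only the 8 basis bytes 1<<i through the window (with a direct bit_length-based polynomial remainder instead of A's mask-walking division) and assembles all 256 table entries by XOR-combining the basis values.
import Mathlib
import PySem

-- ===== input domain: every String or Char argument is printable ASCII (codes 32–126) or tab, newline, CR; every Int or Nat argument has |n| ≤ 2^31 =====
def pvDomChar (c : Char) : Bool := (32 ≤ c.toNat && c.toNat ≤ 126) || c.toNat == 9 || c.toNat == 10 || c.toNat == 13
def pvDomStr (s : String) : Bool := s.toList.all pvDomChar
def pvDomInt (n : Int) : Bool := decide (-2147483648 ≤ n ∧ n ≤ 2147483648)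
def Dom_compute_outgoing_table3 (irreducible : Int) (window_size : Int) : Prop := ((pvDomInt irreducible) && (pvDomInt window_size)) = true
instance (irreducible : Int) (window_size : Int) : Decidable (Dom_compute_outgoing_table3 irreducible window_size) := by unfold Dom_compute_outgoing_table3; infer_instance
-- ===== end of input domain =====

-- B computes the same table by reducing only the 8 basis bytes and XOR-combining them
-- (GF(2)-linearity); equality of the RETURN values is proved on Pre_ (A's termination domain).

-- ===== PORT A =====
-- Under Pre_ every integer A manipulates is nonnegative, where Python's <<, >>, ^, &, <=, >=
-- coincide with the ℕ operations used here.  Each while-loop carries explicit fuel purely for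
-- totality (Python has none); the fuel chosen in pvA_divide is proved sufficient below.

-- 'while mask <= p2: mask = mask << 1'
def pvA_loop1 : Nat → Nat → Nat → Nat
  | 0, mask, _ => mask
  | f+1, mask, p2 => if mask ≤ p2 then pvA_loop1 f (mask <<< 1) p2 else mask

-- 'while mask <= p1: mask = mask << 1; p2 = p2 << 1'
def pvA_loop2 : Nat → Nat → Nat → Nat → Nat × Nat
  | 0, mask, p2, _ => (mask, p2)
  | f+1, mask, p2, p1 => if mask ≤ p1 then pvA_loop2 f (mask <<< 1) (p2 <<< 1) p1 else (mask, p2)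

-- 'while p2 >= org_p2: (if mask & p1 > 0: p1 = p1 ^ p2); mask = mask >> 1; p2 = p2 >> 1'
def pvA_loop3 : Nat → Nat → Nat → Nat → Nat → Nat
  | 0, p1, _, _, _ => p1
  | f+1, p1, mask, p2, org =>
      if org ≤ p2 then
        pvA_loop3 f (if 0 < mask &&& p1 then p1 ^^^ p2 else p1) (mask >>> 1) (p2 >>> 1) org
      else p1

-- divide_polynomial(p1, p2)
def pvA_divide (p1 p2 : Nat) : Nat :=
  let fuel := p1 + p2 + 8
  let mask := pvA_loop1 fuel 1 p2
  let mp := pvA_loop2 fuel mask p2 p1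
  pvA_loop3 fuel p1 (mp.1 >>> 1) mp.2 p2

-- 'r = byte; for i in range(window_size): r = divide_polynomial(r << 8, irreducible)'
def pvA_inner (m : Nat) : Nat → Nat → Nat
  | 0, r => r
  | k+1, r => pvA_inner m k (pvA_divide (r <<< 8) m)

def compute_outgoing_table3 (irreducible : Int) (window_size : Int) : List Int :=
  (PySem.List.pyRange 0 256 1).map
    (fun byte => (pvA_inner irreducible.toNat window_size.toNat byte.toNat : Int))

-- ===== PORT B =====
-- termination of pvB_polymod: each reduction step clears the leading bit, so p decreases
theorem pvB_dec {p m : Nat} (h1 : 0 < m) (h2 : m.size ≤ p.size) :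
    p ^^^ m <<< (p.size - m.size) < p := by
  have hms : 1 ≤ m.size := Nat.size_pos.2 h1
  have hp0 : 0 < p := Nat.size_pos.1 (by omega)
  have hts : (m <<< (p.size - m.size)).size = p.size := by
    rw [Nat.size_shiftLeft h1.ne']
    omega
  have hb : p.size - 1 + 1 = p.size := by omega
  have hpub : p < 2^p.size := Nat.lt_size_self p
  have htub : m <<< (p.size - m.size) < 2^p.size := by
    have h3 := Nat.lt_size_self (m <<< (p.size - m.size))
    rw [hts] at h3
    exact h3
  have hplb : 2^(p.size - 1) ≤ p := Nat.lt_size.1 (by omega)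
  have htlb : 2^(p.size - 1) ≤ m <<< (p.size - m.size) := Nat.lt_size.1 (by omega)
  have hpow : 2^p.size = 2^(p.size - 1) * 2 := by rw [← pow_succ, hb]
  have hdiv : ∀ y : ℕ, 2^(p.size - 1) ≤ y → y < 2^p.size → y / 2^(p.size - 1) % 2 = 1 := by
    intro y hy1 hy2
    have hy3 : y / 2^(p.size - 1) = 1 := Nat.div_eq_of_lt_le (by simpa using hy1) (by omega)
    rw [hy3]
  have hx : (p ^^^ m <<< (p.size - m.size)).testBit (p.size - 1) = false := by
    rw [Nat.testBit_xor, Nat.testBit_eq_decide_div_mod_eq, Nat.testBit_eq_decide_div_mod_eq,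
      hdiv p hplb hpub, hdiv _ htlb htub]
    rfl
  have hxub : p ^^^ m <<< (p.size - m.size) < 2^p.size := Nat.xor_lt_two_pow hpub htub
  have h4 : (p ^^^ m <<< (p.size - m.size)) / 2^(p.size - 1) < 2 :=
    Nat.div_lt_of_lt_mul (by omega)
  rw [Nat.testBit_eq_decide_div_mod_eq] at hx
  simp only [decide_eq_false_iff_not] at hx
  have h5 := Nat.mod_eq_of_lt h4
  have h6 : (p ^^^ m <<< (p.size - m.size)) / 2^(p.size - 1) = 0 := by omega
  have h7 : p ^^^ m <<< (p.size - m.size) < 2^(p.size - 1) :=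
    Nat.lt_of_div_eq_zero (by positivity) h6
  omega

-- B's _polymod(p, m): Nat.size is Python's int.bit_length on ℕ.  The '0 < m' conjunct is a
-- totality guard only: for m = 0 Python's loop cannot exit (unreachable under Pre_).
def pvB_polymod (p m : Nat) : Nat :=
  if h : 0 < m ∧ m.size ≤ p.size then pvB_polymod (p ^^^ m <<< (p.size - m.size)) m else p
  termination_by p
  decreasing_by exact pvB_dec h.1 h.2

-- 'r = 1 << i; for _ in range(window_size): r = _polymod(r << 8, irreducible)'
def pvB_inner (m : Nat) : Nat → Nat → Nat
  | 0, r => r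
  | k+1, r => pvB_inner m k (pvB_polymod (r <<< 8) m)

def compute_outgoing_table3_alt (irreducible : Int) (window_size : Int) : List Int :=
  let basis : List Nat :=
    (List.range 8).map (fun i => pvB_inner irreducible.toNat window_size.toNat (1 <<< i))
  (PySem.List.pyRange 0 256 1).map
    (fun byte => (((List.range 8).foldl
      (fun v i => if (byte.toNat >>> i) &&& 1 = 1 then v ^^^ basis.getD i 0 else v) 0 : Nat) : Int))

-- ===== PRECONDITION & SPEC =====
-- Pre_ is exactly A's termination domain: for irreducible ≤ 0 with window_size ≥ 1 the last
-- while-loop of divide_polynomial never exits (Python A diverges, returning nothing).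
def Pre_compute_outgoing_table3 (irreducible : Int) (window_size : Int) : Prop :=
  1 ≤ irreducible ∨ window_size ≤ 0
instance (irreducible : Int) (window_size : Int) : Decidable (Pre_compute_outgoing_table3 irreducible window_size) := by unfold Pre_compute_outgoing_table3; infer_instance

def pvWitness_compute_outgoing_table3 : Int × Int := (283, 2)

def Spec_compute_outgoing_table3 (irreducible : Int) (window_size : Int) (out : List Int) : Prop := out = compute_outgoing_table3_alt irreducible window_size
instance (irreducible : Int) (window_size : Int) (out : List Int) : Decidable (Spec_compute_outgoing_table3 irreducible window_size out) := by unfold Spec_compute_outgoing_table3; infer_instance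

-- ===== CLAIM (what is proved, stated in full; the proofs are below) =====
def Claim_equal_compute_outgoing_table3 : Prop := ∀ (irreducible : Int) (window_size : Int), Dom_compute_outgoing_table3 irreducible window_size → Pre_compute_outgoing_table3 irreducible window_size → Spec_compute_outgoing_table3 irreducible window_size (compute_outgoing_table3 irreducible window_size)

-- ===== LEMMAS AND PROOFS =====

-- bit/size toolkit ---------------------------------------------------------
theorem pv_testBit_of_bounds {y n : ℕ} (h1 : 2^n ≤ y) (h2 : y < 2^(n+1)) : y.testBit n = true := by
  rw [Nat.testBit_eq_decide_div_mod_eq]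
  have h3 : y / 2^n = 1 := Nat.div_eq_of_lt_le (by simpa using h1) (by rw [pow_succ] at h2; omega)
  simp [h3]
theorem pv_lt_of_testBit_false {y n : ℕ} (h2 : y < 2^(n+1)) (h3 : y.testBit n = false) : y < 2^n := by
  rw [Nat.testBit_eq_decide_div_mod_eq] at h3
  have h4 : y / 2^n < 2 := Nat.div_lt_of_lt_mul (by rwa [pow_succ] at h2)
  simp only [decide_eq_false_iff_not] at h3
  have h5 := Nat.mod_eq_of_lt h4
  have h6 : y / 2^n = 0 := by omega
  exact Nat.lt_of_div_eq_zero (by positivity) h6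
theorem pv_testBit_ge {y n : ℕ} (h : y.testBit n = true) : 2^n ≤ y := by
  by_contra hc
  rw [Nat.testBit_lt_two_pow (by omega)] at h
  exact Bool.false_ne_true h

theorem pv_size_xor_of_lt {x y : ℕ} (h : x.size < y.size) : (x ^^^ y).size = y.size := by
  have hsy : 1 ≤ y.size := by omega
  have hylb : 2^(y.size - 1) ≤ y := Nat.lt_size.1 (by omega)
  have hyub : y < 2^y.size := Nat.lt_size_self y
  have hxub : x < 2^(y.size - 1) := Nat.size_le.1 (by omega)
  have hup : x ^^^ y < 2^y.size :=
    Nat.xor_lt_two_pow (lt_of_lt_of_le hxub (Nat.pow_le_pow_right (by norm_num) (by omega))) hyub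
  have tx : x.testBit (y.size - 1) = false := Nat.testBit_lt_two_pow hxub
  have ty : y.testBit (y.size - 1) = true := by
    apply pv_testBit_of_bounds hylb
    have : y.size - 1 + 1 = y.size := by omega
    rw [this]; exact hyub
  have tz : (x ^^^ y).testBit (y.size - 1) = true := by
    rw [Nat.testBit_xor, tx, ty]; rfl
  have hlow : 2^(y.size - 1) ≤ x ^^^ y := pv_testBit_ge tz
  have h1 : (x ^^^ y).size ≤ y.size := Nat.size_le.2 hup
  have h2 : y.size - 1 < (x ^^^ y).size := Nat.lt_size.2 hlow
  omega

theorem pv_size_xor_lt {x y : ℕ} (hx : 0 < x) (h : x.size = y.size) : (x ^^^ y).size < x.size := by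
  have hs1 : 1 ≤ x.size := Nat.size_pos.2 hx
  have hxub : x < 2^x.size := Nat.lt_size_self x
  have hyub : y < 2^x.size := by rw [h]; exact Nat.lt_size_self y
  have hxlb : 2^(x.size - 1) ≤ x := Nat.lt_size.1 (by omega)
  have hylb : 2^(x.size - 1) ≤ y := Nat.lt_size.1 (by omega)
  have hb : x.size - 1 + 1 = x.size := by omega
  have tx : x.testBit (x.size - 1) = true := pv_testBit_of_bounds hxlb (by rw [hb]; exact hxub)
  have ty : y.testBit (x.size - 1) = true := pv_testBit_of_bounds hylb (by rw [hb]; exact hyub)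
  have tz : (x ^^^ y).testBit (x.size - 1) = false := by rw [Nat.testBit_xor, tx, ty]; rfl
  have hup : x ^^^ y < 2^(x.size - 1) :=
    pv_lt_of_testBit_false (by rw [hb]; exact Nat.xor_lt_two_pow hxub hyub) tz
  have := Nat.size_le.2 hup
  omega

theorem pv_pm_small {p m : ℕ} (h : ¬ (0 < m ∧ m.size ≤ p.size)) : pvB_polymod p m = p := by
  rw [pvB_polymod]; simp [h]

theorem pv_pm_step {p m : ℕ} (hm : 0 < m) (h : m.size ≤ p.size) :
    pvB_polymod p m = pvB_polymod (p ^^^ m <<< (p.size - m.size)) m := by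
  rw [pvB_polymod]; simp [hm, h]

theorem pv_pm_zero {m : ℕ} (hm : 0 < m) : pvB_polymod 0 m = 0 := by
  apply pv_pm_small
  intro ⟨_, hle⟩
  rw [Nat.size_zero, Nat.le_zero, Nat.size_eq_zero] at hle
  omega

theorem pv_pm_xor_mul {m : ℕ} (hm : 0 < m) : ∀ x kk, pvB_polymod (x ^^^ m <<< kk) m = pvB_polymod x m := by
  intro x
  induction x using Nat.strong_induction_on with
  | _ x ih =>
    intro kk
    have hs1 : 1 ≤ m.size := Nat.size_pos.2 hm
    have hm0 : m ≠ 0 := hm.ne'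
    have hy : (m <<< kk).size = m.size + kk := Nat.size_shiftLeft hm0 kk
    rcases lt_trichotomy x.size (m.size + kk) with hu | hu | hu
    · -- the multiple carries the top bit: one reduction step cancels it
      have hxy : (x ^^^ m <<< kk).size = m.size + kk := by
        rw [← hy] at hu ⊢; exact pv_size_xor_of_lt hu
      rw [pv_pm_step hm (by omega : m.size ≤ (x ^^^ m <<< kk).size), hxy]
      have hk : m.size + kk - m.size = kk := by omega
      rw [hk, Nat.xor_xor_cancel_right]
    · -- equal top positions: reducing x once produces exactly x ^^^ m <<< kk
      rw [pv_pm_step hm (by omega : m.size ≤ x.size), hu]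
      have hk : m.size + kk - m.size = kk := by omega
      rw [hk]
    · -- x carries the top bit: reduce x on both sides and recurse
      have hx0 : 0 < x := Nat.size_pos.1 (by omega)
      have hxy : (x ^^^ m <<< kk).size = x.size := by
        rw [Nat.xor_comm]; exact pv_size_xor_of_lt (by omega)
      have hxs : m.size ≤ x.size := by omega
      have hx' : x ^^^ m <<< (x.size - m.size) < x := pvB_dec hm hxs
      rw [pv_pm_step hm (p := x ^^^ m <<< kk) (by omega), hxy,
        pv_pm_step hm hxs]
      have re : x ^^^ m <<< kk ^^^ m <<< (x.size - m.size)
          = (x ^^^ m <<< (x.size - m.size)) ^^^ m <<< kk := by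
        rw [Nat.xor_assoc, Nat.xor_assoc, Nat.xor_comm (m <<< kk)]
      rw [re, ih _ hx' kk]

theorem pv_pm_xor {m : ℕ} (hm : 0 < m) : ∀ a b, pvB_polymod (a ^^^ b) m = pvB_polymod a m ^^^ pvB_polymod b m := by
  have hs1 : 1 ≤ m.size := Nat.size_pos.2 hm
  have H : ∀ n a b, a + b ≤ n → pvB_polymod (a ^^^ b) m = pvB_polymod a m ^^^ pvB_polymod b m := by
    intro n
    induction n using Nat.strong_induction_on with
    | _ n ih =>
      intro a b hab
      by_cases ha : m.size ≤ a.size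
      · have ha0 : 0 < a := Nat.size_pos.1 (by omega)
        have hlt : a ^^^ m <<< (a.size - m.size) < a := pvB_dec hm ha
        have re : (a ^^^ m <<< (a.size - m.size)) ^^^ b
            = (a ^^^ b) ^^^ m <<< (a.size - m.size) := by
          rw [Nat.xor_assoc, Nat.xor_assoc, Nat.xor_comm b]
        calc pvB_polymod (a ^^^ b) m
            = pvB_polymod ((a ^^^ b) ^^^ m <<< (a.size - m.size)) m := (pv_pm_xor_mul hm _ _).symm
          _ = pvB_polymod ((a ^^^ m <<< (a.size - m.size)) ^^^ b) m := by rw [re]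
          _ = pvB_polymod (a ^^^ m <<< (a.size - m.size)) m ^^^ pvB_polymod b m := by
              exact ih ((a ^^^ m <<< (a.size - m.size)) + b) (by omega) _ _ le_rfl
          _ = pvB_polymod a m ^^^ pvB_polymod b m := by rw [← pv_pm_step hm ha]
      · by_cases hb : m.size ≤ b.size
        · have hb0 : 0 < b := Nat.size_pos.1 (by omega)
          have hlt : b ^^^ m <<< (b.size - m.size) < b := pvB_dec hm hb
          have re : a ^^^ (b ^^^ m <<< (b.size - m.size))
              = (a ^^^ b) ^^^ m <<< (b.size - m.size) := by
            rw [Nat.xor_assoc]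
          calc pvB_polymod (a ^^^ b) m
              = pvB_polymod ((a ^^^ b) ^^^ m <<< (b.size - m.size)) m := (pv_pm_xor_mul hm _ _).symm
            _ = pvB_polymod (a ^^^ (b ^^^ m <<< (b.size - m.size))) m := by rw [re]
            _ = pvB_polymod a m ^^^ pvB_polymod (b ^^^ m <<< (b.size - m.size)) m := by
                exact ih (a + (b ^^^ m <<< (b.size - m.size))) (by omega) _ _ le_rfl
            _ = pvB_polymod a m ^^^ pvB_polymod b m := by rw [← pv_pm_step hm hb]
        · have hau : a < 2^(m.size - 1) := Nat.size_le.1 (by omega)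
          have hbu : b < 2^(m.size - 1) := Nat.size_le.1 (by omega)
          have hxu : a ^^^ b < 2^(m.size - 1) := Nat.xor_lt_two_pow hau hbu
          have hxz : (a ^^^ b).size < m.size := by have := Nat.size_le.2 hxu; omega
          rw [pv_pm_small (by omega), pv_pm_small (by omega), pv_pm_small (by omega)]
  intro a b
  exact H (a + b) a b le_rfl

-- A's division equals B's remainder -----------------------------------------
theorem pv_loop1_spec : ∀ f k p2, p2.size ≤ k + f → pvA_loop1 f (2^k) p2 = 2^(max k p2.size) := by
  intro f
  induction f with
  | zero =>
    intro k p2 h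
    have : max k p2.size = k := by omega
    rw [pvA_loop1, this]
  | succ f ih =>
    intro k p2 h
    rw [pvA_loop1]
    by_cases hg : 2^k ≤ p2
    · have hk : k < p2.size := Nat.lt_size.2 hg
      have hshift : 2^k <<< 1 = 2^(k+1) := by rw [Nat.shiftLeft_eq, ← pow_add]
      rw [if_pos hg, hshift, ih (k+1) p2 (by omega)]
      have : max (k+1) p2.size = max k p2.size := by omega
      rw [this]
    · have hk : p2.size ≤ k := by
        by_contra hc
        exact hg (Nat.lt_size.1 (by omega))
      have : max k p2.size = k := by omega
      rw [if_neg hg, this]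

theorem pv_loop2_spec : ∀ f k p1 m, 0 < m → m.size ≤ k → p1.size ≤ k + f →
    pvA_loop2 f (2^k) (m <<< (k - m.size)) p1 = (2^(max k p1.size), m <<< (max k p1.size - m.size)) := by
  intro f
  induction f with
  | zero =>
    intro k p1 m hm hmk h
    have : max k p1.size = k := by omega
    rw [pvA_loop2, this]
  | succ f ih =>
    intro k p1 m hm hmk h
    rw [pvA_loop2]
    by_cases hg : 2^k ≤ p1
    · have hk : k < p1.size := Nat.lt_size.2 hg
      have hshift : 2^k <<< 1 = 2^(k+1) := by rw [Nat.shiftLeft_eq, ← pow_add]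
      have hshift2 : (m <<< (k - m.size)) <<< 1 = m <<< (k + 1 - m.size) := by
        simp only [Nat.shiftLeft_eq]
        rw [mul_assoc, ← pow_add]
        congr 2
        omega
      rw [if_pos hg, hshift, hshift2, ih (k+1) p1 m hm (by omega) (by omega)]
      have : max (k+1) p1.size = max k p1.size := by omega
      rw [this]
    · have hk : p1.size ≤ k := by
        by_contra hc
        exact hg (Nat.lt_size.1 (by omega))
      have : max k p1.size = k := by omega
      rw [if_neg hg, this]

-- one body step of the third loop, shared by both cases of pv_loop3_spec
theorem pv_loop3_body {p1 m d j : ℕ} (hm : 0 < m) (hd : m.size = d + 1)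
    (hsz : p1.size ≤ d + j + 1) :
    (pvB_polymod (if 0 < 2^(d+j) &&& p1 then p1 ^^^ m <<< j else p1) m = pvB_polymod p1 m)
    ∧ (if 0 < 2^(d+j) &&& p1 then p1 ^^^ m <<< j else p1).size ≤ d + j := by
  by_cases ht : p1.testBit (d+j) = true
  · have hpos : 0 < 2^(d+j) &&& p1 := by
      rw [Nat.two_pow_and, ht]
      simp only [Bool.toNat_true, mul_one]
      positivity
    have hlow : 2^(d+j) ≤ p1 := pv_testBit_ge ht
    have hp0 : 0 < p1 := by have := Nat.two_pow_pos (d+j); omega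
    have hsz1 : p1.size = d + j + 1 := by
      have := Nat.lt_size.2 hlow
      omega
    have hszt : (m <<< j).size = d + j + 1 := by
      rw [Nat.size_shiftLeft hm.ne' j, hd]
      omega
    have hxlt : (p1 ^^^ m <<< j).size < p1.size := pv_size_xor_lt hp0 (by omega)
    rw [if_pos hpos]
    refine ⟨pv_pm_xor_mul hm p1 j, by omega⟩
  · have hf : p1.testBit (d+j) = false := by
      cases hb : p1.testBit (d+j)
      · rfl
      · exact absurd hb ht
    have hneg : ¬ 0 < 2^(d+j) &&& p1 := by
      rw [Nat.two_pow_and, hf]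
      simp
    have hup : p1 < 2^(d+j+1) := Nat.size_le.1 hsz
    have hlt : p1 < 2^(d+j) := pv_lt_of_testBit_false hup hf
    rw [if_neg hneg]
    exact ⟨rfl, Nat.size_le.2 hlt⟩

theorem pv_loop3_spec : ∀ j f p1 m, 0 < m → p1.size ≤ (m.size - 1) + j + 1 → j + 2 ≤ f →
    pvA_loop3 f p1 (2^((m.size - 1) + j)) (m <<< j) m = pvB_polymod p1 m := by
  intro j
  induction j with
  | zero =>
    intro f p1 m hm hsz hf
    obtain ⟨d, hd⟩ : ∃ d, m.size = d + 1 := ⟨m.size - 1, by have := Nat.size_pos.2 hm; omega⟩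
    obtain ⟨f', rfl⟩ : ∃ f', f = f' + 2 := ⟨f - 2, by omega⟩
    simp only [hd, Nat.add_sub_cancel] at hsz ⊢
    obtain ⟨hpm, hsz'⟩ := pv_loop3_body (j := 0) hm hd (by omega)
    rw [pvA_loop3, if_pos (by rw [Nat.shiftLeft_zero] : m ≤ m <<< 0)]
    rw [pvA_loop3]
    have hguard : ¬ m ≤ (m <<< 0) >>> 1 := by
      rw [Nat.shiftLeft_zero, Nat.shiftRight_one]
      omega
    rw [if_neg hguard, ← hpm]
    have hsmall : ¬ (0 < m ∧ m.size ≤ (if 0 < 2^(d+0) &&& p1 then p1 ^^^ m <<< 0 else p1).size) := by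
      intro ⟨_, hle⟩
      rw [hd] at hle
      omega
    rw [pv_pm_small hsmall]
  | succ j ih =>
    intro f p1 m hm hsz hf
    obtain ⟨d, hd⟩ : ∃ d, m.size = d + 1 := ⟨m.size - 1, by have := Nat.size_pos.2 hm; omega⟩
    obtain ⟨f', rfl⟩ : ∃ f', f = f' + 1 := ⟨f - 1, by omega⟩
    simp only [hd, Nat.add_sub_cancel] at hsz ⊢
    obtain ⟨hpm, hsz'⟩ := pv_loop3_body (j := j + 1) hm hd (by omega)
    rw [pvA_loop3, if_pos (by rw [Nat.shiftLeft_eq]; exact Nat.le_mul_of_pos_right m (by positivity))]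
    have hmask : 2^(d+(j+1)) >>> 1 = 2^(d+j) := by
      rw [Nat.shiftRight_one, show d+(j+1) = (d+j)+1 by omega, pow_succ]
      omega
    have hp2 : (m <<< (j+1)) >>> 1 = m <<< j := by
      rw [Nat.shiftLeft_eq, Nat.shiftLeft_eq, Nat.shiftRight_one, pow_succ, ← mul_assoc]
      omega
    rw [hmask, hp2, ← hpm]
    have := ih f' (if 0 < 2^(d+(j+1)) &&& p1 then p1 ^^^ m <<< (j+1) else p1) m hm
      (by rw [hd]; simp only [Nat.add_sub_cancel]; omega) (by omega)
    rw [hd] at this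
    simp only [Nat.add_sub_cancel] at this
    exact this

theorem pv_divide_eq {m : ℕ} (hm : 0 < m) (p : ℕ) : pvA_divide p m = pvB_polymod p m := by
  have hsm : m.size ≤ m := Nat.size_le.2 Nat.lt_two_pow_self
  have hsp : p.size ≤ p := Nat.size_le.2 Nat.lt_two_pow_self
  have hms1 : 1 ≤ m.size := Nat.size_pos.2 hm
  have h1 : pvA_loop1 (p + m + 8) 1 m = 2^m.size := by
    have := pv_loop1_spec (p + m + 8) 0 m (by omega)
    simpa using this
  have h2 : pvA_loop2 (p + m + 8) (2^m.size) m p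
      = (2^(max m.size p.size), m <<< (max m.size p.size - m.size)) := by
    have := pv_loop2_spec (p + m + 8) m.size p m hm le_rfl (by omega)
    rwa [Nat.sub_self, Nat.shiftLeft_zero] at this
  have hKm : m.size ≤ max m.size p.size := le_max_left _ _
  have hKp : p.size ≤ max m.size p.size := le_max_right _ _
  have h3 : (2^(max m.size p.size)) >>> 1 = 2^(max m.size p.size - 1) := by
    obtain ⟨K', hK'⟩ : ∃ K', max m.size p.size = K' + 1 := ⟨max m.size p.size - 1, by omega⟩
    rw [hK', Nat.shiftRight_one, pow_succ, Nat.add_sub_cancel]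
    omega
  have hj : (m.size - 1) + (max m.size p.size - m.size) = max m.size p.size - 1 := by omega
  have h4 := pv_loop3_spec (max m.size p.size - m.size) (p + m + 8) p m hm (by omega) (by omega)
  rw [hj] at h4
  show pvA_loop3 (p + m + 8) p
      ((pvA_loop2 (p + m + 8) (pvA_loop1 (p + m + 8) 1 m) m p).1 >>> 1)
      ((pvA_loop2 (p + m + 8) (pvA_loop1 (p + m + 8) 1 m) m p).2) m = pvB_polymod p m
  rw [h1, h2]
  show pvA_loop3 (p + m + 8) p (2^(max m.size p.size) >>> 1)
      (m <<< (max m.size p.size - m.size)) m = pvB_polymod p m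
  rw [h3]
  exact h4

theorem pv_inner_eq {m : ℕ} (hm : 0 < m) : ∀ k r, pvA_inner m k r = pvB_inner m k r := by
  intro k
  induction k with
  | zero => intro r; rfl
  | succ k ih => intro r; simp only [pvA_inner, pvB_inner, pv_divide_eq hm, ih]

-- linearity of the reduction chain ------------------------------------------
theorem pv_inner_zero {m : ℕ} (hm : 0 < m) : ∀ k, pvB_inner m k 0 = 0 := by
  intro k
  induction k with
  | zero => rfl
  | succ k ih => simp only [pvB_inner, Nat.zero_shiftLeft, pv_pm_zero hm, ih]

theorem pv_inner_xor {m : ℕ} (hm : 0 < m) : ∀ k a b,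
    pvB_inner m k (a ^^^ b) = pvB_inner m k a ^^^ pvB_inner m k b := by
  intro k
  induction k with
  | zero => intro a b; rfl
  | succ k ih =>
    intro a b
    simp only [pvB_inner, Nat.shiftLeft_xor_distrib, pv_pm_xor hm, ih]

-- assembling a byte from its bits -------------------------------------------
theorem pv_fold_bits : ∀ (n : ℕ) (F : ℕ → ℕ), F 0 = 0 → (∀ a b, F (a ^^^ b) = F a ^^^ F b) →
    ∀ (b v : ℕ),
    (List.range n).foldl (fun v i => if (b >>> i) &&& 1 = 1 then v ^^^ F (2^i) else v) v
      = v ^^^ F (b % 2^n) := by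
  intro n
  induction n with
  | zero =>
    intro F hF0 hFx b v
    simp [Nat.mod_one, hF0]
  | succ n ih =>
    intro F hF0 hFx b v
    have hF'0 : F (0 <<< 1) = 0 := by rw [Nat.zero_shiftLeft, hF0]
    have hF'x : ∀ a c, F ((a ^^^ c) <<< 1) = F (a <<< 1) ^^^ F (c <<< 1) := by
      intro a c
      rw [Nat.shiftLeft_xor_distrib, hFx]
    rw [List.range_succ_eq_map, List.foldl_cons, List.foldl_map]
    have hfun : (fun (v i : ℕ) =>
          if (b >>> (Nat.succ i)) &&& 1 = 1 then v ^^^ F (2^(Nat.succ i)) else v)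
        = (fun (v i : ℕ) =>
          if ((b >>> 1) >>> i) &&& 1 = 1 then v ^^^ (fun x => F (x <<< 1)) (2^i) else v) := by
      funext v i
      have e1 : b >>> (Nat.succ i) = (b >>> 1) >>> i := by
        rw [← Nat.shiftRight_add]
        congr 1
        omega
      have e2 : (2:ℕ)^i <<< 1 = 2^(Nat.succ i) := by rw [Nat.shiftLeft_eq, ← pow_add]
      rw [e1]
      simp only [e2]
    rw [hfun, ih (fun x => F (x <<< 1)) hF'0 hF'x (b >>> 1)]
    have hkey : b % 2^(n+1) = (((b >>> 1) % 2^n) <<< 1) ^^^ (b % 2) := by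
      have h1 : b % (2 * 2^n) = b % 2 + 2 * (b / 2 % 2^n) := Nat.mod_mul
      have hsr : b >>> 1 = b / 2 := Nat.shiftRight_one b
      have hsl : ((b / 2) % 2^n) <<< 1 = 2 * ((b / 2) % 2^n) := by
        rw [Nat.shiftLeft_eq]
        ring
      have hp : (2:ℕ)^(n+1) = 2 * 2^n := by ring
      rcases Nat.mod_two_eq_zero_or_one b with hr | hr
      · rw [hsr, hsl, hr, Nat.xor_zero, hp, h1, hr]
        omega
      · rw [hsr, hsl, hr]
        have he : (2 * (b / 2 % 2^n)) ^^^ 1 = 2 * (b / 2 % 2^n) + 1 :=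
          Nat.xor_one_of_even ⟨b / 2 % 2^n, by ring⟩
        rw [he, hp, h1, hr]
        omega
    rcases Nat.mod_two_eq_zero_or_one b with hr | hr
    · have hg : ¬ ((b >>> 0) &&& 1 = 1) := by
        rw [Nat.shiftRight_zero, Nat.and_one_is_mod, hr]
        omega
      rw [if_neg hg, hkey, hr, Nat.xor_zero]
    · have hg : (b >>> 0) &&& 1 = 1 := by
        rw [Nat.shiftRight_zero, Nat.and_one_is_mod, hr]
      rw [if_pos hg, hkey, hr, hFx, pow_zero]
      rw [Nat.xor_assoc, Nat.xor_comm (F 1)]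

theorem pv_getD_map_range {g : ℕ → ℕ} {i n : ℕ} (h : i < n) : ((List.range n).map g).getD i 0 = g i := by
  rw [List.getD_eq_getElem?_getD, List.getElem?_map, List.getElem?_range h]
  rfl

theorem pv_entry (m k b : ℕ) (hb : b < 256) (hmk : 0 < m ∨ k = 0) :
    pvA_inner m k b =
      (List.range 8).foldl
        (fun v i => if (b >>> i) &&& 1 = 1 then
            v ^^^ ((List.range 8).map (fun i => pvB_inner m k (1 <<< i))).getD i 0
          else v) 0 := by
  have hfold : ∀ F : ℕ → ℕ, F 0 = 0 → (∀ a c, F (a ^^^ c) = F a ^^^ F c) →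
      (∀ r, pvB_inner m k r = F r) →
      (List.range 8).foldl
        (fun v i => if (b >>> i) &&& 1 = 1 then
            v ^^^ ((List.range 8).map (fun i => pvB_inner m k (1 <<< i))).getD i 0
          else v) 0 = F b := by
    intro F hF0 hFx hFr
    rw [PySem.List.foldl_congr_mem _ _
      (fun v i => if (b >>> i) &&& 1 = 1 then v ^^^ F (2^i) else v) 0
      (by
        intro acc i hi
        have hi8 : i < 8 := List.mem_range.1 hi
        rw [pv_getD_map_range hi8, hFr, Nat.one_shiftLeft])]
    rw [pv_fold_bits 8 F hF0 hFx b 0, Nat.zero_xor, Nat.mod_eq_of_lt (by norm_num at hb ⊢; omega : b < 2^8)]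
  rcases hmk with hm | hk
  · rw [pv_inner_eq hm k b]
    exact (hfold (pvB_inner m k) (pv_inner_zero hm k) (pv_inner_xor hm k) (fun _ => rfl)).symm
  · subst hk
    exact (hfold id rfl (fun _ _ => rfl) (fun _ => rfl)).symm

-- ===== VERDICT (by name: the statement is the Claim_ definition above) =====
theorem compute_outgoing_table3_spec : Claim_equal_compute_outgoing_table3 := by
  intro irr ws _ hpre
  unfold Spec_compute_outgoing_table3 compute_outgoing_table3 compute_outgoing_table3_alt
  apply List.map_congr_left
  intro byte hbyte
  have hmem := (PySem.List.mem_pyRange_one).1 hbyte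
  have hb : byte.toNat < 256 := by omega
  have hmk : 0 < irr.toNat ∨ ws.toNat = 0 := by
    rcases hpre with h | h
    · left; omega
    · right; omega
  exact_mod_cast congrArg (Nat.cast (R := Int)) (pv_entry irr.toNat ws.toNat byte.toNat hb hmk)
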